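-- pv_equiv track=rewrite | github.com/paiml/depyler | examples/hard_set_operations_advanced.py | set_partition_even_odd
-- ===== SOURCE A (Python) =====
-- def set_partition_even_odd(data: list[int]) -> list[list[int]]:
--     """Partition unique elements into even and odd sets.
--
--     Returns [even_set, odd_set] where each is sorted and deduplicated.
--     """
--     evens: dict[int, bool] = {}
--     odds: dict[int, bool] = {}
--     for x in data:
--         if x % 2 == 0:
--             evens[x] = True
--         else:
--             odds[x] = True
--     even_list: list[int] = []
--     for key in evens:
--         even_list.append(key)
--     even_list.sort()
--     odd_list: list[int] = []
--     for key in odds: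
--         odd_list.append(key)
--     odd_list.sort()
--     return [even_list, odd_list]
-- ===== SOURCE B (Python) =====
-- def _merge_unique(a: list[int], b: list[int]) -> list[int]:
--     """Merge two sorted duplicate-free lists into one sorted duplicate-free list."""
--     i, j = 0, 0
--     out: list[int] = []
--     while i < len(a) and j < len(b):
--         if a[i] < b[j]:
--             out.append(a[i])
--             i += 1
--         elif b[j] < a[i]:
--             out.append(b[j])
--             j += 1
--         else:
--             out.append(a[i])
--             i += 1
--             j += 1
--     out.extend(a[i:])
--     out.extend(b[j:])
--     return out
--
--
-- def _partition(data: list[int]) -> tuple: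
--     """Divide and conquer: (sorted unique evens, sorted unique odds) of data."""
--     if not data:
--         return ([], [])
--     if len(data) == 1:
--         x = data[0]
--         return (([x], []) if x % 2 == 0 else ([], [x]))
--     mid = len(data) // 2
--     e1, o1 = _partition(data[:mid])
--     e2, o2 = _partition(data[mid:])
--     return (_merge_unique(e1, e2), _merge_unique(o1, o2))
--
--
-- def set_partition_even_odd(data: list[int]) -> list[list[int]]:
--     """Partition unique elements into even and odd sets.
--
--     Returns [even_set, odd_set] where each is sorted and deduplicated.
--     """
--     evens, odds = _partition(data)
--     return [evens, odds]
-- ===== Notes on version B (the rewrite author's own statement) =====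
-- stated objective: alternative
-- what changed: A buckets values into two dicts in one pass and then sorts each key list with a library sort; B uses neither dicts nor a sort call: it divides the list in half, recursively partitions each half, and merges the two sorted duplicate-free even (resp. odd) lists with a deduplicating two-pointer merge.
import Mathlib
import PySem

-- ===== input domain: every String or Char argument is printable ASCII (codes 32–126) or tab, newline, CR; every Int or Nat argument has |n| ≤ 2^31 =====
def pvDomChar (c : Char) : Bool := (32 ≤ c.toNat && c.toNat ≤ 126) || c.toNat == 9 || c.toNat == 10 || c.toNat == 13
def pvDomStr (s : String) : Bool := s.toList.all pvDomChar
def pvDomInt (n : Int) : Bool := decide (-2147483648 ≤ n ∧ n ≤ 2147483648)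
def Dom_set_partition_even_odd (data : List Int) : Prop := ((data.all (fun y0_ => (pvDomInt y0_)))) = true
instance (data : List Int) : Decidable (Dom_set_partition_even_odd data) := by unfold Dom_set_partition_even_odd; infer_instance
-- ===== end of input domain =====

-- B replaces A's dict-bucketing + two sort calls by a divide-and-conquer partition: split in half, recurse, and combine with a deduplicating two-pointer merge (alternative: no dict, no sort call).

-- ===== PORT A =====
def set_partition_even_odd (data : List Int) : List (List Int) :=
  -- evens/odds dicts built in one loop over data
  let st := data.foldl
    (fun (st : PySem.Dict Int Bool × PySem.Dict Int Bool) x =>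
      if PySem.Int.mod x 2 == 0 then (st.1.insert x true, st.2) else (st.1, st.2.insert x true))
    (PySem.Dict.empty, PySem.Dict.empty)
  -- for key in evens: even_list.append(key)
  let even_list := st.1.keys.foldl (fun acc k => acc ++ [k]) []
  let even_list := PySem.List.sorted even_list (fun x => x) false
  -- for key in odds: odd_list.append(key)
  let odd_list := st.2.keys.foldl (fun acc k => acc ++ [k]) []
  let odd_list := PySem.List.sorted odd_list (fun x => x) false
  [even_list, odd_list]

-- ===== PORT B =====
-- _merge_unique's two-pointer while-loop over immutable lists, as the obvious
-- structural recursion on the two remaining suffixes (the extend calls are the base cases)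
def pvMergeU : List Int → List Int → List Int
  | [], b => b
  | x :: a, [] => x :: a
  | x :: a, y :: b =>
    if x < y then x :: pvMergeU a (y :: b)
    else if y < x then y :: pvMergeU (x :: a) b
    else x :: pvMergeU a b

-- _partition; data[0] via pyGet?/getD 0, exact since len(data) = 1 in that branch
def pvPartition (data : List Int) : List Int × List Int :=
  if data.length = 0 then ([], [])
  else if data.length = 1 then
    let x := (PySem.List.pyGet? data 0).getD 0
    if PySem.Int.mod x 2 == 0 then ([x], []) else ([], [x])
  else
    let mid := data.length / 2
    let l := pvPartition (PySem.List.slice data none (some ((mid : Nat) : Int)))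
    let r := pvPartition (PySem.List.slice data (some ((mid : Nat) : Int)) none)
    (pvMergeU l.1 r.1, pvMergeU l.2 r.2)
termination_by data.length
decreasing_by
  · rw [PySem.List.slice_to_natCast]; simp [List.length_take]; omega
  · rw [PySem.List.slice_from_natCast]; simp; omega

def set_partition_even_odd_alt (data : List Int) : List (List Int) :=
  let p := pvPartition data
  [p.1, p.2]

-- ===== PRECONDITION & SPEC =====
def Spec_set_partition_even_odd (data : List Int) (out : List (List Int)) : Prop := out = set_partition_even_odd_alt data
instance (data : List Int) (out : List (List Int)) : Decidable (Spec_set_partition_even_odd data out) := by unfold Spec_set_partition_even_odd; infer_instance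

-- ===== CLAIM =====
def Claim_equal_set_partition_even_odd : Prop := ∀ (data : List Int), Dom_set_partition_even_odd data → Spec_set_partition_even_odd data (set_partition_even_odd data)

-- ===== LEMMAS AND PROOFS =====

-- A's paired dict-building loop splits into two filtered insert folds.
theorem pv_fold_pair (p : Int → Bool) (l : List Int) (e o : PySem.Dict Int Bool) :
    l.foldl
      (fun (st : PySem.Dict Int Bool × PySem.Dict Int Bool) x =>
        if p x then (st.1.insert x true, st.2) else (st.1, st.2.insert x true)) (e, o)
    = ((l.filter p).foldl (fun d x => d.insert x true) e,
       (l.filter (fun x => !p x)).foldl (fun d x => d.insert x true) o) := by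
  induction l generalizing e o with
  | nil => simp
  | cons x t ih =>
    by_cases hx : p x = true <;> simp [hx, ih]

theorem pv_keys_fold (l : List Int) :
    ((l.foldl (fun d x => d.insert x true) (PySem.Dict.empty : PySem.Dict Int Bool))).keys
      = PySem.Set.ofList l := by
  rw [PySem.Dict.keys_foldl_insert]
  simp [PySem.Set.update, PySem.Set.ofList_eq_foldl, PySem.Dict.empty]

theorem pv_append_fold (l acc : List Int) :
    l.foldl (fun a k => a ++ [k]) acc = acc ++ l := by
  induction l generalizing acc with
  | nil => simp
  | cons x t ih => simp [ih]

-- two-pointer merge of sorted duplicate-free lists: members are the union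
theorem pv_mem_merge (a b : List Int) (c : Int) : c ∈ pvMergeU a b ↔ c ∈ a ∨ c ∈ b := by
  fun_induction pvMergeU a b with
  | case1 b => simp
  | case2 x a => simp
  | case3 x a y b h ih => simp [ih]; tauto
  | case4 x a y b h1 h2 ih => simp [ih]; tauto
  | case5 x a y b h1 h2 ih =>
    have : x = y := by omega
    subst this
    simp [ih]; tauto

-- and the merge of two strictly sorted lists is strictly sorted
theorem pv_pairwise_merge (a b : List Int) (ha : a.Pairwise (· < ·)) (hb : b.Pairwise (· < ·)) :
    (pvMergeU a b).Pairwise (· < ·) := by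
  fun_induction pvMergeU a b with
  | case1 b => simpa [pvMergeU] using hb
  | case2 x a => simpa [pvMergeU] using ha
  | case3 x a y b h ih =>
    refine List.pairwise_cons.mpr ⟨?_, ih (List.pairwise_cons.mp ha).2 hb⟩
    intro c hc
    rcases (pv_mem_merge _ _ c).mp hc with hc | hc
    · exact (List.pairwise_cons.mp ha).1 c hc
    · rcases List.mem_cons.mp hc with rfl | hc
      · exact h
      · exact lt_trans h ((List.pairwise_cons.mp hb).1 c hc)
  | case4 x a y b h1 h2 ih =>
    refine List.pairwise_cons.mpr ⟨?_, ih ha (List.pairwise_cons.mp hb).2⟩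
    intro c hc
    rcases (pv_mem_merge _ _ c).mp hc with hc | hc
    · rcases List.mem_cons.mp hc with rfl | hc
      · exact h2
      · exact lt_trans h2 ((List.pairwise_cons.mp ha).1 c hc)
    · exact (List.pairwise_cons.mp hb).1 c hc
  | case5 x a y b h1 h2 ih =>
    have hxy : x = y := by omega
    subst hxy
    refine List.pairwise_cons.mpr ⟨?_, ih (List.pairwise_cons.mp ha).2 (List.pairwise_cons.mp hb).2⟩
    intro c hc
    rcases (pv_mem_merge _ _ c).mp hc with hc | hc
    · exact (List.pairwise_cons.mp ha).1 c hc
    · exact (List.pairwise_cons.mp hb).1 c hc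

-- divide-and-conquer invariant: each side of pvPartition is strictly sorted and
-- holds exactly the members of data with the corresponding parity
theorem pv_partition_spec (data : List Int) :
    ((pvPartition data).1.Pairwise (· < ·) ∧
      (∀ a, a ∈ (pvPartition data).1 ↔ a ∈ data ∧ (PySem.Int.mod a 2 == 0) = true)) ∧
    ((pvPartition data).2.Pairwise (· < ·) ∧
      (∀ a, a ∈ (pvPartition data).2 ↔ a ∈ data ∧ ¬ (PySem.Int.mod a 2 == 0) = true)) := by
  fun_induction pvPartition data with
  | case1 data h0 =>
    have : data = [] := List.length_eq_zero_iff.mp h0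
    subst this
    simp
  | case2 data h0 h1 x hp =>
    obtain ⟨y, rfl⟩ := List.length_eq_one_iff.mp h1
    have hxy : x = y := by simp [x, PySem.List.pyGet?, PySem.List.pyIdx?]
    rw [hxy] at hp ⊢
    simp at hp ⊢
    exact hp
  | case3 data h0 h1 x hp =>
    obtain ⟨y, rfl⟩ := List.length_eq_one_iff.mp h1
    have hxy : x = y := by simp [x, PySem.List.pyGet?, PySem.List.pyIdx?]
    rw [hxy] at hp ⊢
    simp at hp ⊢
    exact hp
  | case4 data h0 h1 mid l r ihl ihr =>
    have hsplit : ∀ a : Int, a ∈ data ↔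
        a ∈ PySem.List.slice data none (some ((data.length / 2 : Nat) : Int)) ∨
        a ∈ PySem.List.slice data (some ((data.length / 2 : Nat) : Int)) none := by
      intro a
      rw [PySem.List.slice_to_natCast, PySem.List.slice_from_natCast]
      conv_lhs => rw [← List.take_append_drop (data.length / 2) data]
      exact List.mem_append
    refine ⟨⟨pv_pairwise_merge _ _ ihl.1.1 ihr.1.1, ?_⟩,
            pv_pairwise_merge _ _ ihl.2.1 ihr.2.1, ?_⟩ <;> intro a
    · rw [pv_mem_merge, ihl.1.2 a, ihr.1.2 a, hsplit a]; tauto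
    · rw [pv_mem_merge, ihl.2.2 a, ihr.2.2 a, hsplit a]; tauto

-- each side of the partition equals sorted(set(filter parity data))
theorem pv_sorted_eq_side (data : List Int) (res : List Int) (p : Int → Bool)
    (hp : res.Pairwise (· < ·)) (hm : ∀ a, a ∈ res ↔ a ∈ data ∧ p a = true) :
    PySem.List.sorted (PySem.Set.ofList (data.filter p)) (fun x => x) false = res := by
  apply PySem.List.sorted_eq_of_perm_of_pairwise_lt
  · rw [List.perm_ext_iff_of_nodup (hp.imp ne_of_lt) (PySem.Set.nodup_ofList _)]
    intro a
    rw [hm a, PySem.Set.mem_ofList, List.mem_filter]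
  · exact hp

-- ===== VERDICT =====
theorem set_partition_even_odd_spec : Claim_equal_set_partition_even_odd := by
  intro data _
  unfold Spec_set_partition_even_odd set_partition_even_odd set_partition_even_odd_alt
  rw [pv_fold_pair]
  simp only [pv_keys_fold, pv_append_fold, List.nil_append]
  obtain ⟨⟨hp1, hm1⟩, hp2, hm2⟩ := pv_partition_spec data
  rw [pv_sorted_eq_side data ((pvPartition data).1) (fun x => PySem.Int.mod x 2 == 0) hp1 hm1,
      pv_sorted_eq_side data ((pvPartition data).2) (fun x => !(PySem.Int.mod x 2 == 0)) hp2
        (fun a => by rw [hm2 a]; simp)]
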